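-- pv_equiv track=rewrite | github.com/saparia-data/data_structure | geeksforgeeks/backtracking/1_Rat_Maze_With_Multiple_Jumps.py | solveMazeUtil
-- ===== SOURCE A (Python) =====
-- N = 4
--
-- def isSafe(maze, x, y):
--
--     # if (x, y outside maze) return false
--     if (x >= 0 and x < N and y >= 0 and
--          y < N and maze[x][y] != 0):
--         return True
--     return False
--
-- def solveMazeUtil(maze, x, y, sol):
--
--     # if (x, y is goal) return True
--     if (x == N - 1 and y == N - 1) :
--         sol[x][y] = 1
--         return True
--
--     # Check if maze[x][y] is valid
--     if (isSafe(maze, x, y) == True):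
--
--         # mark x, y as part of solution path
--         sol[x][y] = 1
--
--
--         for i in range(1, N):
--             if (i <= maze[x][y]):
--
--
--                 if (solveMazeUtil(maze, x + i,
--                                   y, sol) == True):
--                     return True
--
--
--                 if (solveMazeUtil(maze, x,
--                                   y + i, sol) == True):
--                     return True
--
--         sol[x][y] = 0
--         return False
--
--     return False
-- ===== SOURCE B (Python) =====
-- N = 4
--
-- def solveMazeUtil(maze, x, y, sol):
--     # Bottom-up DP over the 4x4 grid instead of exponential backtracking;
--     # marks one solution path in sol on success (as the backtracker does).
--     if not (0 <= x < N and 0 <= y < N):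
--         return False
--     can = {}
--     for a in range(N - 1, -1, -1):
--         for b in range(N - 1, -1, -1):
--             if a == N - 1 and b == N - 1:
--                 can[(a, b)] = True
--             elif maze[a][b] == 0:
--                 can[(a, b)] = False
--             else:
--                 can[(a, b)] = any(
--                     i <= maze[a][b]
--                     and ((a + i < N and can[(a + i, b)])
--                          or (b + i < N and can[(a, b + i)]))
--                     for i in range(1, N))
--     if not can[(x, y)]:
--         return False
--     a, b = x, y
--     while (a, b) != (N - 1, N - 1):
--         sol[a][b] = 1
--         for i in range(1, N):
--             if i <= maze[a][b] and a + i < N and can[(a + i, b)]: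
--                 a = a + i
--                 break
--             if i <= maze[a][b] and b + i < N and can[(a, b + i)]:
--                 b = b + i
--                 break
--     sol[N - 1][N - 1] = 1
--     return True
-- ===== Notes on version B (the rewrite author's own statement) =====
-- stated objective: alternative
-- what changed: Replaces the exponential recursive backtracking with a bottom-up DP: one pass fills a 16-entry reachability table over the fixed 4x4 grid (cells processed in dependency order), then one walk reconstructs the path; no recursion and no re-exploration.
-- outside the precondition, e.g. on solveMazeUtil([[0]], 0, 0, []): A returns False, B raises IndexError
import Mathlib
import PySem

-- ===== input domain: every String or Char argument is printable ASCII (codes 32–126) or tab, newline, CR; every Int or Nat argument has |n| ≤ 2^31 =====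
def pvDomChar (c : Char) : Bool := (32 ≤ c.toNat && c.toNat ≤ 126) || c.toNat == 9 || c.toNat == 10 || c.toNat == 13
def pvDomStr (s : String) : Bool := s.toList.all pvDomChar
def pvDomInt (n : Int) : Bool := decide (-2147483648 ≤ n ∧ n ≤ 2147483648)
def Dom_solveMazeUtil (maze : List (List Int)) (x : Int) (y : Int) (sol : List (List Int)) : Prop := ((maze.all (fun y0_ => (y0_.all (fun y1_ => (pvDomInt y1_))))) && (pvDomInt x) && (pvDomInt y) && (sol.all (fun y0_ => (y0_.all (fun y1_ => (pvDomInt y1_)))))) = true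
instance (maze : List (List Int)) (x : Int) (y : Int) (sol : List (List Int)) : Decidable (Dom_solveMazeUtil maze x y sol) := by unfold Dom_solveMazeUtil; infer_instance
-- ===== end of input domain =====

-- Header: B replaces A's exponential backtracking over the fixed 4x4 grid by a bottom-up
-- reachability table filled once in dependency order (an alternative, non-recursive algorithm).
-- A (and B, identically) mutates `sol` in place; the equivalence proved here is about the
-- RETURN value only.


-- ===== PORT A =====

-- maze[a][b]; total via defaults — Pre_ guarantees the indices are in range wherever A reads
def cellAt (maze : List (List Int)) (a b : Int) : Int :=
  PySem.List.pyGetD (PySem.List.pyGetD maze a []) b 0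

def isSafe (maze : List (List Int)) (x y : Int) : Bool :=
  decide (0 ≤ x ∧ x < 4 ∧ 0 ≤ y ∧ y < 4 ∧ cellAt maze x y ≠ 0)

-- A's recursion, with a fuel guard making it total: each recursive call strictly increases
-- x + y, which stays ≤ 6 at every recursing (safe) cell, so fuel 8 is never exhausted.
-- The writes to sol do not affect the returned Bool and are dropped (return-value port);
-- the loop with its early `return True`s is the short-circuiting `any`.
def solveA (fuel : Nat) (maze : List (List Int)) (x : Int) (y : Int) (sol : List (List Int)) : Bool :=
  match fuel with
  | 0 => false
  | fuel + 1 =>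
    if x = 3 ∧ y = 3 then true
    else if isSafe maze x y = true then
      (PySem.List.pyRange 1 4 1).any (fun i =>
        decide (i ≤ cellAt maze x y) &&
          (solveA fuel maze (x + i) y sol || solveA fuel maze x (y + i) sol))
    else false

def solveMazeUtil (maze : List (List Int)) (x : Int) (y : Int) (sol : List (List Int)) : Bool :=
  solveA 8 maze x y sol

-- ===== PORT B =====

-- value of one DP cell from the table built so far (Source B's loop body)
def bVal (maze : List (List Int)) (d : PySem.Dict (Int × Int) Bool) (a b : Int) : Bool :=
  if a = 3 ∧ b = 3 then true
  else if cellAt maze a b = 0 then false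
  else (PySem.List.pyRange 1 4 1).any (fun i =>
    decide (i ≤ cellAt maze a b) &&
      ((decide (a + i < 4) && d.getD (a + i, b) false) ||
       (decide (b + i < 4) && d.getD (a, b + i) false)))

-- the two nested `for … in range(3, -1, -1)` loops filling `can`
def bTable (maze : List (List Int)) : PySem.Dict (Int × Int) Bool :=
  (PySem.List.pyRange 3 (-1) (-1)).foldl (fun d a =>
    (PySem.List.pyRange 3 (-1) (-1)).foldl (fun d b => d.insert (a, b) (bVal maze d a b)) d)
    PySem.Dict.empty

-- Source B's path-marking loop only mutates sol and never changes the returned Bool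
-- (it returns True exactly when can[(x, y)] was True), so the return-value port is can[(x, y)].
def solveMazeUtil_alt (maze : List (List Int)) (x : Int) (y : Int) (sol : List (List Int)) : Bool :=
  if 0 ≤ x ∧ x < 4 ∧ 0 ≤ y ∧ y < 4 then (bTable maze).getD (x, y) false else false

-- ===== PRECONDITION & SPEC =====

-- Pre_ excludes the inputs on which Python A raises IndexError (reading maze[.][.] or writing
-- sol[.][.] at a visited in-grid cell of a too-small list). It is slightly coarser than the
-- exact raise set: when the start is in the 4x4 grid it requires maze and sol to be full 4x4
-- grids, although A returns without raising on a few smaller inputs whose traversal stops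
-- before reaching a missing cell (see the cites in claim.json).
def Pre_solveMazeUtil (maze : List (List Int)) (x : Int) (y : Int) (sol : List (List Int)) : Prop :=
  (0 ≤ x ∧ x < 4 ∧ 0 ≤ y ∧ y < 4) →
    ((4 ≤ maze.length ∧ ∀ r ∈ maze.take 4, 4 ≤ r.length) ∧
     (4 ≤ sol.length ∧ ∀ r ∈ sol.take 4, 4 ≤ r.length))
instance (maze : List (List Int)) (x : Int) (y : Int) (sol : List (List Int)) : Decidable (Pre_solveMazeUtil maze x y sol) := by unfold Pre_solveMazeUtil; infer_instance

def pvWitness_solveMazeUtil : List (List Int) × Int × Int × List (List Int) :=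
  ([[1, 1, 1, 1], [0, 0, 1, 0], [0, 0, 1, 0], [0, 0, 1, 1]], 0, 0,
   [[0, 0, 0, 0], [0, 0, 0, 0], [0, 0, 0, 0], [0, 0, 0, 0]])

def Spec_solveMazeUtil (maze : List (List Int)) (x : Int) (y : Int) (sol : List (List Int)) (out : Bool) : Prop := out = solveMazeUtil_alt maze x y sol
instance (maze : List (List Int)) (x : Int) (y : Int) (sol : List (List Int)) (out : Bool) : Decidable (Spec_solveMazeUtil maze x y sol out) := by unfold Spec_solveMazeUtil; infer_instance

-- ===== CLAIM (what is proved, stated in full; the proofs are below) =====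
def Claim_equal_solveMazeUtil : Prop := ∀ (maze : List (List Int)) (x : Int) (y : Int) (sol : List (List Int)), Dom_solveMazeUtil maze x y sol → Pre_solveMazeUtil maze x y sol → Spec_solveMazeUtil maze x y sol (solveMazeUtil maze x y sol)

-- ===== LEMMAS AND PROOFS =====

-- the common mathematical value: "from (x, y) the goal (3, 3) is reachable" as a
-- well-founded recursion (x + y strictly increases, bounded by 6 at safe cells)
def g (maze : List (List Int)) (x y : Int) : Bool :=
  if x = 3 ∧ y = 3 then true
  else if h : 0 ≤ x ∧ x < 4 ∧ 0 ≤ y ∧ y < 4 ∧ cellAt maze x y ≠ 0 then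
    (decide ((1 : Int) ≤ cellAt maze x y) && (g maze (x + 1) y || g maze x (y + 1))) ||
    ((decide ((2 : Int) ≤ cellAt maze x y) && (g maze (x + 2) y || g maze x (y + 2))) ||
     (decide ((3 : Int) ≤ cellAt maze x y) && (g maze (x + 3) y || g maze x (y + 3))))
  else false
termination_by (8 - x - y).toNat
decreasing_by all_goals omega

lemma g_false (maze : List (List Int)) (x y : Int) (h1 : ¬(x = 3 ∧ y = 3))
    (h2 : ¬(0 ≤ x ∧ x < 4 ∧ 0 ≤ y ∧ y < 4 ∧ cellAt maze x y ≠ 0)) : g maze x y = false := by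
  rw [g, if_neg h1, dif_neg h2]

lemma g_out (maze : List (List Int)) (x y : Int) (h : ¬(0 ≤ x ∧ x < 4 ∧ 0 ≤ y ∧ y < 4)) :
    g maze x y = false := by
  apply g_false <;> intro hc <;> apply h
  · omega
  · exact ⟨hc.1, hc.2.1, hc.2.2.1, hc.2.2.2.1⟩

lemma pyRange14 : PySem.List.pyRange 1 4 1 = [1, 2, 3] := by decide
lemma pyRange3dn : PySem.List.pyRange 3 (-1) (-1) = [3, 2, 1, 0] := by decide

lemma solveA_eq_g : ∀ (fuel : Nat) (maze : List (List Int)) (x y : Int) (sol : List (List Int)),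
    1 ≤ fuel → (0 ≤ x → 0 ≤ y → 6 - x - y < (fuel : Int)) →
    solveA fuel maze x y sol = g maze x y := by
  intro fuel
  induction fuel with
  | zero => intro _ _ _ _ h _; omega
  | succ n ih =>
    intro maze x y sol _ hfe
    by_cases hg : x = 3 ∧ y = 3
    · rw [solveA, if_pos hg, g, if_pos hg]
    · by_cases hs : isSafe maze x y = true
      · have hp : 0 ≤ x ∧ x < 4 ∧ 0 ≤ y ∧ y < 4 ∧ cellAt maze x y ≠ 0 := by
          simpa [isSafe] using hs
        obtain ⟨hx0, hx4, hy0, hy4, hc⟩ := hp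
        have hsum : 6 - x - y < (n : Int) + 1 := by
          have := hfe hx0 hy0; push_cast at this ⊢; omega
        have hn1 : 1 ≤ n := by
          rcases Decidable.not_and_iff_not_or_not.mp hg with h | h <;> omega
        have hrec : ∀ x' y' : Int, x + y < x' + y' → 0 ≤ x' → 0 ≤ y' →
            solveA n maze x' y' sol = g maze x' y' := by
          intro x' y' hlt hx' hy'
          exact ih maze x' y' sol hn1 (fun _ _ => by omega)
        rw [solveA, if_neg hg, if_pos hs, pyRange14]
        simp only [List.any_cons, List.any_nil, Bool.or_false]
        rw [hrec (x + 1) y (by omega) (by omega) (by omega),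
            hrec x (y + 1) (by omega) (by omega) (by omega),
            hrec (x + 2) y (by omega) (by omega) (by omega),
            hrec x (y + 2) (by omega) (by omega) (by omega),
            hrec (x + 3) y (by omega) (by omega) (by omega),
            hrec x (y + 3) (by omega) (by omega) (by omega)]
        conv_rhs => rw [g]
        rw [if_neg hg, dif_pos ⟨hx0, hx4, hy0, hy4, hc⟩]
      · have hp : ¬(0 ≤ x ∧ x < 4 ∧ 0 ≤ y ∧ y < 4 ∧ cellAt maze x y ≠ 0) := by
          simpa [isSafe] using hs
        rw [solveA, if_neg hg, if_neg hs, g_false maze x y hg hp]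

-- one DP step: inserting cell (a, b) keeps "every processed cell holds its g-value"
lemma bStep_done (maze : List (List Int)) (d : PySem.Dict (Int × Int) Bool)
    (done : List (Int × Int)) (a b : Int)
    (hd : ∀ p ∈ done, d.getD p false = g maze p.1 p.2)
    (ha : 0 ≤ a) (ha3 : a ≤ 3) (hb : 0 ≤ b) (hb3 : b ≤ 3)
    (hdep : ∀ i ∈ ([1, 2, 3] : List Int),
      (a + i < 4 → (a + i, b) ∈ done) ∧ (b + i < 4 → (a, b + i) ∈ done)) :
    ∀ p ∈ ((a, b) :: done),
      (d.insert (a, b) (bVal maze d a b)).getD p false = g maze p.1 p.2 := by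
  have hval : bVal maze d a b = g maze a b := by
    have hdown : ∀ i ∈ ([1, 2, 3] : List Int),
        (decide (a + i < 4) && d.getD (a + i, b) false) = g maze (a + i) b := by
      intro i hi
      by_cases h4 : a + i < 4
      · rw [decide_eq_true h4, Bool.true_and, hd _ ((hdep i hi).1 h4)]
      · rw [decide_eq_false h4, Bool.false_and, g_out maze _ _ (by omega)]
    have hright : ∀ i ∈ ([1, 2, 3] : List Int),
        (decide (b + i < 4) && d.getD (a, b + i) false) = g maze a (b + i) := by
      intro i hi
      by_cases h4 : b + i < 4
      · rw [decide_eq_true h4, Bool.true_and, hd _ ((hdep i hi).2 h4)]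
      · rw [decide_eq_false h4, Bool.false_and, g_out maze _ _ (by omega)]
    by_cases hgl : a = 3 ∧ b = 3
    · rw [bVal, if_pos hgl, g, if_pos hgl]
    · by_cases hz : cellAt maze a b = 0
      · rw [bVal, if_neg hgl, if_pos hz, g_false maze a b hgl (by tauto)]
      · rw [bVal, if_neg hgl, if_neg hz, pyRange14]
        simp only [List.any_cons, List.any_nil, Bool.or_false]
        rw [hdown 1 (by simp), hright 1 (by simp), hdown 2 (by simp), hright 2 (by simp),
            hdown 3 (by simp), hright 3 (by simp)]
        conv_rhs => rw [g]
        rw [if_neg hgl, dif_pos ⟨ha, by omega, hb, by omega, hz⟩]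
  intro p hp
  rw [PySem.Dict.getD_insert]
  rcases List.mem_cons.mp hp with rfl | hpd
  · rw [if_pos rfl]; exact hval
  · by_cases he : p = (a, b)
    · rw [if_pos he, he]; exact hval
    · rw [if_neg he]; exact hd p hpd

lemma table_getD (maze : List (List Int)) (x y : Int)
    (hx0 : 0 ≤ x) (hx4 : x < 4) (hy0 : 0 ≤ y) (hy4 : y < 4) :
    (bTable maze).getD (x, y) false = g maze x y := by
  have h0 : ∀ p ∈ ([] : List (Int × Int)),
      (PySem.Dict.empty : PySem.Dict (Int × Int) Bool).getD p false = g maze p.1 p.2 := by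
    simp
  have h1 := bStep_done maze _ _ 3 3 h0 (by norm_num) (by norm_num) (by norm_num) (by norm_num) (by decide)
  have h2 := bStep_done maze _ _ 3 2 h1 (by norm_num) (by norm_num) (by norm_num) (by norm_num) (by decide)
  have h3 := bStep_done maze _ _ 3 1 h2 (by norm_num) (by norm_num) (by norm_num) (by norm_num) (by decide)
  have h4 := bStep_done maze _ _ 3 0 h3 (by norm_num) (by norm_num) (by norm_num) (by norm_num) (by decide)
  have h5 := bStep_done maze _ _ 2 3 h4 (by norm_num) (by norm_num) (by norm_num) (by norm_num) (by decide)
  have h6 := bStep_done maze _ _ 2 2 h5 (by norm_num) (by norm_num) (by norm_num) (by norm_num) (by decide)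
  have h7 := bStep_done maze _ _ 2 1 h6 (by norm_num) (by norm_num) (by norm_num) (by norm_num) (by decide)
  have h8 := bStep_done maze _ _ 2 0 h7 (by norm_num) (by norm_num) (by norm_num) (by norm_num) (by decide)
  have h9 := bStep_done maze _ _ 1 3 h8 (by norm_num) (by norm_num) (by norm_num) (by norm_num) (by decide)
  have h10 := bStep_done maze _ _ 1 2 h9 (by norm_num) (by norm_num) (by norm_num) (by norm_num) (by decide)
  have h11 := bStep_done maze _ _ 1 1 h10 (by norm_num) (by norm_num) (by norm_num) (by norm_num) (by decide)
  have h12 := bStep_done maze _ _ 1 0 h11 (by norm_num) (by norm_num) (by norm_num) (by norm_num) (by decide)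
  have h13 := bStep_done maze _ _ 0 3 h12 (by norm_num) (by norm_num) (by norm_num) (by norm_num) (by decide)
  have h14 := bStep_done maze _ _ 0 2 h13 (by norm_num) (by norm_num) (by norm_num) (by norm_num) (by decide)
  have h15 := bStep_done maze _ _ 0 1 h14 (by norm_num) (by norm_num) (by norm_num) (by norm_num) (by decide)
  have h16 := bStep_done maze _ _ 0 0 h15 (by norm_num) (by norm_num) (by norm_num) (by norm_num) (by decide)
  have hmem : (x, y) ∈ ((0, 0) :: (0, 1) :: (0, 2) :: (0, 3) :: (1, 0) :: (1, 1) :: (1, 2) ::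
      (1, 3) :: (2, 0) :: (2, 1) :: (2, 2) :: (2, 3) :: (3, 0) :: (3, 1) :: (3, 2) :: (3, 3) ::
      ([] : List (Int × Int))) := by
    interval_cases x <;> interval_cases y <;> decide
  have hfin := h16 (x, y) hmem
  rw [bTable, pyRange3dn]
  simp only [List.foldl_cons, List.foldl_nil]
  exact hfin

-- ===== VERDICT (by name: the statement is the Claim_ definition above) =====
theorem solveMazeUtil_spec : Claim_equal_solveMazeUtil := by
  intro maze x y sol _hdom _hpre
  unfold Spec_solveMazeUtil solveMazeUtil solveMazeUtil_alt
  have hA : solveA 8 maze x y sol = g maze x y :=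
    solveA_eq_g 8 maze x y sol (by norm_num) (fun hx hy => by norm_num; omega)
  rw [hA]
  by_cases hin : 0 ≤ x ∧ x < 4 ∧ 0 ≤ y ∧ y < 4
  · rw [if_pos hin, table_getD maze x y hin.1 hin.2.1 hin.2.2.1 hin.2.2.2]
  · rw [if_neg hin, g_out maze x y hin]
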